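-- pv_equiv track=rewrite | github.com/X2bee/PlateeRAG_backend | service/retrieval/document_processor/document_processor.py | _find_line_index_by_pos
-- ===== SOURCE A (Python) =====
-- import logging, os, re, bisect, asyncio
-- from typing import Any, Dict, List, Optional
--
-- def _find_line_index_by_pos(pos: int, line_table: List[Dict[str, int]]) -> int:
--     try:
--         if not line_table:
--             return 0
--         starts = [l["start"] for l in line_table]
--         idx = bisect.bisect_right(starts, pos) - 1
--         return 0 if idx < 0 else min(idx, len(line_table)-1)
--     except Exception:
--         return 0
-- ===== SOURCE B (Python) =====
-- def _find_line_index_by_pos(pos: int, line_table):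
--     # The line containing byte `pos` is the last line starting at or before it:
--     # count the lines with start <= pos in one linear pass and clamp at 0.
--     # Defensive: a malformed table (a record without "start") yields 0.
--     try:
--         return max(sum(l["start"] <= pos for l in line_table) - 1, 0)
--     except Exception:
--         return 0
-- ===== Notes on version B (the rewrite author's own statement) =====
-- stated objective: simpler
-- what changed: B replaces the build-starts-list-then-bisect pipeline with a single counting pass (number of lines with start <= pos, minus one, clamped at 0); Pre_ excludes only tables whose start values are present but not nondecreasing, where bisect_right's result on an unsorted list is an artefact of its search path that no caller would specify.
-- outside the precondition, e.g. on _find_line_index_by_pos(0, [{'start': 5}, {'start': 0}]): A returns 1, B returns 0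
import Mathlib
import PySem

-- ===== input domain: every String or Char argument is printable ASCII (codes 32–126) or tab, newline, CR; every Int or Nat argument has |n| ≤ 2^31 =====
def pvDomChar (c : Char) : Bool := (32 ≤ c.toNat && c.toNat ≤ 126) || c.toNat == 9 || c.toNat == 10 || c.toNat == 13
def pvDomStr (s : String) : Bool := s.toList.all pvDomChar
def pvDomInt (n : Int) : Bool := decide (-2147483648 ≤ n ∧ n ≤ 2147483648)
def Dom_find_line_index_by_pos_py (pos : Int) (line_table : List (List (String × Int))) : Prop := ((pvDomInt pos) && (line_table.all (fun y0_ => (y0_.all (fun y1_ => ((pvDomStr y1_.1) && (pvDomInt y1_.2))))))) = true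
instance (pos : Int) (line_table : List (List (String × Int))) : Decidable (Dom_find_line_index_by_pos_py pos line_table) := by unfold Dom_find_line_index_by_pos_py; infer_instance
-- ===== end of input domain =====

-- B replaces build-starts-then-bisect with one counting pass (lines with start <= pos, minus 1,
-- clamped at 0): simpler, same O(n) cost.

-- ===== PORT A =====
-- starts = [l["start"] for l in line_table]; none = a KeyError was raised (caught by A's except)
def pvGetStarts : List (List (String × Int)) → Option (List Int)
  | [] => some []
  | l :: rest =>
    match l.lookup "start", pvGetStarts rest with
    | some s, some ss => some (s :: ss)
    | _, _ => none

-- transcription of CPython's bisect.bisect_right(a, x, lo, hi) loop; the structural fuel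
-- argument only makes the halving loop total (fuel ≥ hi - lo at every call, so it never runs out)
-- and the .getD 0 is an in-bounds guard only (mid < hi ≤ a.length at every call in the port)
def pvBisectRight (a : List Int) (x : Int) : Nat → Nat → Nat → Nat
  | lo, _, 0 => lo
  | lo, hi, fuel+1 =>
    if lo < hi then
      let mid := (lo + hi) / 2
      if x < (a[mid]?).getD 0 then pvBisectRight a x lo mid fuel
      else pvBisectRight a x (mid + 1) hi fuel
    else lo

def find_line_index_by_pos_py (pos : Int) (line_table : List (List (String × Int))) : Int :=
  if line_table = [] then 0
  else
    match pvGetStarts line_table with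
    | none => 0  -- the comprehension raised KeyError; A's except returns 0
    | some starts =>
      let idx : Int := (pvBisectRight starts pos 0 starts.length starts.length : Int) - 1
      if idx < 0 then 0 else min idx ((line_table.length : Int) - 1)

-- ===== PORT B =====
-- the leading 'if any line lacks "start"' ports B's try/except: the counting sum raises KeyError
-- exactly when some line lacks the key, and the except returns 0; sum(l["start"] <= pos for l in
-- line_table) is ported as countP (the .getD 0 never fires: the guard ensured every key is present)
def find_line_index_by_pos_py_alt (pos : Int) (line_table : List (List (String × Int))) : Int :=
  if line_table.any (fun l => (l.lookup "start").isNone) then 0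
  else max ((line_table.countP (fun l => decide (((l.lookup "start").getD 0) ≤ pos)) : Int) - 1) 0

-- ===== PRECONDITION & SPEC =====
-- Pre_ excludes only tables whose start values are all present but NOT nondecreasing:
-- bisect_right's result on an unsorted list is an artefact of its search path that no caller
-- would specify (A returns it, B returns the count-based index); on tables with a missing
-- "start" key both programs return 0, so those stay inside Pre_.
def Pre_find_line_index_by_pos_py (pos : Int) (line_table : List (List (String × Int))) : Prop :=
  (line_table.all (fun l => (l.lookup "start").isSome)) = true →
  (line_table.map (fun l => (l.lookup "start").getD 0)).Pairwise (· ≤ ·)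
instance (pos : Int) (line_table : List (List (String × Int))) : Decidable (Pre_find_line_index_by_pos_py pos line_table) := by unfold Pre_find_line_index_by_pos_py; infer_instance

def pvWitness_find_line_index_by_pos_py : Int × (List (List (String × Int))) :=
  (7, [[("start", 0)], [("start", 5)], [("start", 11)]])

def Spec_find_line_index_by_pos_py (pos : Int) (line_table : List (List (String × Int))) (out : Int) : Prop := out = find_line_index_by_pos_py_alt pos line_table
instance (pos : Int) (line_table : List (List (String × Int))) (out : Int) : Decidable (Spec_find_line_index_by_pos_py pos line_table out) := by unfold Spec_find_line_index_by_pos_py; infer_instance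

-- ===== CLAIM (what is proved, stated in full; the proofs are below) =====
def Claim_equal_find_line_index_by_pos_py : Prop := ∀ (pos : Int) (line_table : List (List (String × Int))), Dom_find_line_index_by_pos_py pos line_table → Pre_find_line_index_by_pos_py pos line_table → Spec_find_line_index_by_pos_py pos line_table (find_line_index_by_pos_py pos line_table)

-- ===== LEMMAS AND PROOFS =====
theorem pvGetStarts_none_iff (lt : List (List (String × Int))) :
    pvGetStarts lt = none ↔ lt.any (fun l => (l.lookup "start").isNone) = true := by
  induction lt with
  | nil => simp [pvGetStarts]
  | cons l rest ih =>
    simp only [pvGetStarts, List.any_cons, Bool.or_eq_true]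
    cases hl : l.lookup "start" <;> cases hr : pvGetStarts rest <;>
      simp_all [Option.isNone]

theorem pvGetStarts_some (lt : List (List (String × Int))) (ss : List Int)
    (h : pvGetStarts lt = some ss) :
    ss = lt.map (fun l => (l.lookup "start").getD 0) := by
  induction lt generalizing ss with
  | nil => simp [pvGetStarts] at h; simp [h]
  | cons l rest ih =>
    simp only [pvGetStarts] at h
    cases hl : l.lookup "start" <;> cases hr : pvGetStarts rest <;> simp [hl, hr] at h
    subst h
    simp [hl, ih _ hr]

-- a list that satisfies p exactly on indices < lo has countP p = lo
theorem pv_count_split (a : List Int) (x : Int) (lo : Nat) (hlo : lo ≤ a.length)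
    (hlow : ∀ i (h : i < a.length), i < lo → a[i] ≤ x)
    (hhigh : ∀ i (h : i < a.length), lo ≤ i → x < a[i]) :
    a.countP (fun v => decide (v ≤ x)) = lo := by
  have hsplit : a.countP (fun v => decide (v ≤ x))
      = (a.take lo).countP (fun v => decide (v ≤ x)) + (a.drop lo).countP (fun v => decide (v ≤ x)) := by
    conv_lhs => rw [← List.take_append_drop lo a]
    rw [List.countP_append]
  have h1' : (a.take lo).countP (fun v => decide (v ≤ x)) = (a.take lo).length := by
    apply List.countP_eq_length.2
    intro v hv
    rw [List.mem_iff_getElem] at hv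
    obtain ⟨i, hilen, rfl⟩ := hv
    have hil : i < lo := by simp at hilen; omega
    rw [List.getElem_take]
    exact decide_eq_true (hlow i (by simp at hilen; omega) hil)
  have h2' : (a.drop lo).countP (fun v => decide (v ≤ x)) = 0 := by
    apply List.countP_eq_zero.2
    intro v hv
    rw [List.mem_iff_getElem] at hv
    obtain ⟨i, hilen, rfl⟩ := hv
    rw [List.getElem_drop]
    simp only [decide_eq_true_eq]
    have := hhigh (lo + i) (by simp at hilen; omega) (by omega)
    simp only [not_le]
    exact this
  rw [hsplit, h1', h2', List.length_take]
  omega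

-- on a sorted list, bisect_right with correct boundary invariants computes the count of ≤ x
theorem pvBisect_count (a : List Int) (x : Int)
    (hs : ∀ i j (hi : i < a.length) (hj : j < a.length), i < j → a[i] ≤ a[j]) :
    ∀ (fuel lo hi : Nat), hi - lo ≤ fuel → lo ≤ hi → hi ≤ a.length →
    (∀ i (h : i < a.length), i < lo → a[i] ≤ x) →
    (∀ i (h : i < a.length), hi ≤ i → x < a[i]) →
    pvBisectRight a x lo hi fuel = a.countP (fun v => decide (v ≤ x)) := by
  intro fuel
  induction fuel with
  | zero =>
    intro lo hi hfuel hle hhi hlow hhigh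
    have : lo = hi := by omega
    subst this
    exact (pv_count_split a x lo hhi hlow (fun i h hge => hhigh i h hge)).symm
  | succ fuel ih =>
    intro lo hi hfuel hle hhi hlow hhigh
    by_cases hlt : lo < hi
    · rw [pvBisectRight, if_pos hlt]
      have hmid : (lo + hi) / 2 < a.length := by omega
      by_cases hx : x < (a[(lo + hi) / 2]?).getD 0
      · rw [if_pos hx]
        rw [List.getElem?_eq_getElem hmid, Option.getD_some] at hx
        refine ih lo ((lo + hi) / 2) (by omega) (by omega) (by omega) hlow ?_
        intro i h hge
        refine lt_of_lt_of_le hx ?_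
        rcases Nat.eq_or_lt_of_le hge with rfl | hlt2
        · exact le_rfl
        · exact hs _ i hmid h hlt2
      · rw [if_neg hx]
        rw [List.getElem?_eq_getElem hmid, Option.getD_some, not_lt] at hx
        refine ih ((lo + hi) / 2 + 1) hi (by omega) (by omega) hhi ?_ hhigh
        intro i h hle2
        rcases Nat.lt_or_ge i lo with hlo | hge
        · exact hlow i h hlo
        · refine le_trans ?_ hx
          rcases Nat.lt_or_ge i ((lo + hi) / 2) with h2 | h2
          · exact hs i _ h hmid h2
          · have : i = (lo + hi) / 2 := by omega
            subst this; exact le_rfl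
    · rw [pvBisectRight, if_neg hlt]
      have : lo = hi := by omega
      subst this
      exact (pv_count_split a x lo hhi hlow (fun i h hge => hhigh i h hge)).symm

-- ===== VERDICT (by name: the statement is the Claim_ definition above) =====
theorem find_line_index_by_pos_py_spec : Claim_equal_find_line_index_by_pos_py := by
  intro pos lt _ hpre
  show find_line_index_by_pos_py pos lt = find_line_index_by_pos_py_alt pos lt
  unfold find_line_index_by_pos_py find_line_index_by_pos_py_alt
  by_cases hnil : lt = []
  · subst hnil; simp
  · rw [if_neg hnil]
    by_cases hany : lt.any (fun l => (l.lookup "start").isNone) = true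
    · rw [if_pos hany, (pvGetStarts_none_iff lt).2 hany]
    · rw [if_neg hany]
      have hkeys : (lt.all (fun l => (l.lookup "start").isSome)) = true := by
        rw [List.all_eq_true]
        intro l hl
        by_contra hc
        exact hany (List.any_eq_true.2 ⟨l, hl, by cases h : List.lookup "start" l <;> simp_all⟩)
      have hsorted := hpre hkeys
      cases hg : pvGetStarts lt with
      | none =>
        exact absurd ((pvGetStarts_none_iff lt).1 hg) hany
      | some starts =>
        have hs := pvGetStarts_some lt starts hg
        set f : List (String × Int) → Int := fun l => (l.lookup "start").getD 0 with hf
        have hlen : starts.length = lt.length := by rw [hs]; simp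
        have hmono : ∀ i j (hi : i < starts.length) (hj : j < starts.length), i < j → starts[i] ≤ starts[j] := by
          intro i j hi hj hij
          have := List.pairwise_iff_getElem.1 hsorted i j (by rw [← hs]; exact hi) (by rw [← hs]; exact hj) hij
          simpa [hs] using this
        have hcount := pvBisect_count starts pos hmono starts.length 0 starts.length (by omega) (Nat.zero_le _) le_rfl
          (by omega) (by intro i h hge; omega)
        have hcnt_map : starts.countP (fun v => decide (v ≤ pos)) = lt.countP (fun l => decide (f l ≤ pos)) := by
          rw [hs, List.countP_map]; rfl
        dsimp only
        rw [hcount, hcnt_map]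
        have hle : lt.countP (fun l => decide (f l ≤ pos)) ≤ lt.length := List.countP_le_length
        have hpos : 1 ≤ lt.length := by cases lt with | nil => exact absurd rfl hnil | cons _ _ => simp
        set c := lt.countP (fun l => decide (f l ≤ pos)) with hc
        rcases Nat.eq_zero_or_pos c with h0 | h0
        · rw [h0]; simp
        · rw [if_neg (by omega)]
          omega
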